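-- pv_equiv track=rewrite | github.com/ManfredAr/Sudoku-Solver-with-Machine-Vision | FinalYearProject/backend/killerSudokuSolver3.py | upperLimit
-- ===== SOURCE A (Python) =====
-- def upperLimit(numVariables, cageSum):
--     '''
--     Finds the upper limit of the cage depending on the number of variables and cage sum.
--
--     parameters:
--     numVariable - int containing the number of variables in the cage.
--     cageSum - int containt the sum of the cage.
--
--     returns:
--     the upper limit the cell can contain.
--     '''
--     lowSum = (0,1,3,6,10,15,21,28,36,45)
--     upper = 9
--     while True:
--         if upper + lowSum[numVariables-1] > cageSum:
--             upper -= 1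
--         else:
--             break
--     return upper
-- ===== SOURCE B (Python) =====
-- def upperLimit(numVariables, cageSum):
--     '''Closed form: the answer is the largest upper with upper + lowSum[numVariables-1] <= cageSum, capped at 9.'''
--     lowSum = (0, 1, 3, 6, 10, 15, 21, 28, 36, 45)
--     return min(9, cageSum - lowSum[numVariables - 1])
-- ===== Notes on version B (the rewrite author's own statement) =====
-- stated objective: simpler
-- what changed: The unbounded decrement loop is replaced by the closed form min(9, cageSum - lowSum[numVariables-1]).
import Mathlib
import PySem

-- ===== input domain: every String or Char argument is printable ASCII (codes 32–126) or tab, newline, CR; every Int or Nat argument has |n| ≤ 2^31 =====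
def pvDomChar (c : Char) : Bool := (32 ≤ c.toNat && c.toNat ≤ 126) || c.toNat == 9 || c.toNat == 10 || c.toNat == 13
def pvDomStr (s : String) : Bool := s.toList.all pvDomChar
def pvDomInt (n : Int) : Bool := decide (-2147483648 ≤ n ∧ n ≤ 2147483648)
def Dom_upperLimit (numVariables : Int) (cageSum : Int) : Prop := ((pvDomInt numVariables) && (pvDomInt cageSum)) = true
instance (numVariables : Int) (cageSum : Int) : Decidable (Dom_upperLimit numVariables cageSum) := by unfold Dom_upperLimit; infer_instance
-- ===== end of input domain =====

-- ===== PORT A =====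
-- B replaces A's decrement loop by the closed form min(9, cageSum - lowSum[numVariables-1]) (objective: simpler).
def pvLowSum : List Int := [0, 1, 3, 6, 10, 15, 21, 28, 36, 45]

-- the 'while True' decrement loop of A, step for step
def upperLimitLoop (low cageSum upper : Int) : Int :=
  if upper + low > cageSum then upperLimitLoop low cageSum (upper - 1) else upper
termination_by (upper - (cageSum - low)).toNat
decreasing_by omega

def upperLimit (numVariables : Int) (cageSum : Int) : Int :=
  upperLimitLoop (PySem.List.pyGetD pvLowSum (numVariables - 1) 0) cageSum 9

-- ===== PORT B =====
def upperLimit_alt (numVariables : Int) (cageSum : Int) : Int :=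
  min 9 (cageSum - PySem.List.pyGetD pvLowSum (numVariables - 1) 0)

-- ===== PRECONDITION & SPEC =====
-- Pre_ excludes exactly the inputs where lowSum[numVariables-1] raises IndexError in both A and B.
def Pre_upperLimit (numVariables : Int) (cageSum : Int) : Prop := -9 ≤ numVariables ∧ numVariables ≤ 10
instance (numVariables : Int) (cageSum : Int) : Decidable (Pre_upperLimit numVariables cageSum) := by unfold Pre_upperLimit; infer_instance
def pvWitness_upperLimit : Int × Int := (3, 10)
def Spec_upperLimit (numVariables : Int) (cageSum : Int) (out : Int) : Prop := out = upperLimit_alt numVariables cageSum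
instance (numVariables : Int) (cageSum : Int) (out : Int) : Decidable (Spec_upperLimit numVariables cageSum out) := by unfold Spec_upperLimit; infer_instance

-- ===== CLAIM (what is proved, stated in full; the proofs are below) =====
def Claim_equal_upperLimit : Prop := ∀ (numVariables : Int) (cageSum : Int), Dom_upperLimit numVariables cageSum → Pre_upperLimit numVariables cageSum → Spec_upperLimit numVariables cageSum (upperLimit numVariables cageSum)

-- ===== LEMMAS AND PROOFS =====
theorem upperLimitLoop_eq_min (low cageSum upper : Int) :
    upperLimitLoop low cageSum upper = min upper (cageSum - low) := by
  fun_induction upperLimitLoop low cageSum upper with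
  | case1 u h ih => omega
  | case2 u h => omega

-- ===== VERDICT (by name: the statement is the Claim_ definition above) =====
theorem upperLimit_spec : Claim_equal_upperLimit := by
  intro n c _ _
  unfold Spec_upperLimit upperLimit upperLimit_alt
  exact upperLimitLoop_eq_min _ _ _
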